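-- pv_equiv track=rewrite | github.com/AngelMP02/ordenacion | A.py | contar_identificadores_unicos
-- ===== SOURCE A (Python) =====
-- def contar_identificadores_unicos(n, identificadores):
--     contador_unicos = 0
--     for i in range(n):
--         es_unico = True
--         for j in range(i):
--             if identificadores[i] == identificadores[j]:
--                 es_unico = False
--                 break
--         if es_unico:
--             contador_unicos += 1
--     return contador_unicos
-- ===== SOURCE B (Python) =====
-- def contar_identificadores_unicos(n, identificadores):
--     vistos = set()
--     for i in range(n):
--         vistos.add(identificadores[i])
--     return len(vistos)
-- ===== Notes on version B (the rewrite author's own statement) =====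
-- stated objective: faster
-- what changed: Replaces the quadratic nested backward scan with a single pass that inserts each of the first n identifiers into a hash set and returns its size.
-- outside the precondition, e.g. on contar_identificadores_unicos(1, []): A returns 1, B raises IndexError
import Mathlib
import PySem

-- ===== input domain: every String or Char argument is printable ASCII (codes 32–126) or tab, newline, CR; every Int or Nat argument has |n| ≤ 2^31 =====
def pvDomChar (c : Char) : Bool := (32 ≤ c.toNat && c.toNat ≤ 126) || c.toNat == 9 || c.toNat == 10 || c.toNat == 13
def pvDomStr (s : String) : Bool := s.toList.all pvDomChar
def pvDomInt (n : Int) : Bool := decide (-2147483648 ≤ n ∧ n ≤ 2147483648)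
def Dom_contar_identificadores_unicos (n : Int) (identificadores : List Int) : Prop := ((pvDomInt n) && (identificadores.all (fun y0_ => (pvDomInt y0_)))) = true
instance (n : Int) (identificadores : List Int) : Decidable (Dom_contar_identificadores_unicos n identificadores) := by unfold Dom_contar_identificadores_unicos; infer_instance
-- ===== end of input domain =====

-- B replaces A's quadratic nested backward scan with a single pass inserting each of the
-- first n identifiers into a set and returning its size (objective: faster).

-- ===== PORT A =====
def contar_identificadores_unicos (n : Int) (identificadores : List Int) : Int :=
  (PySem.List.pyRange 0 n 1).foldl (fun contador_unicos i =>
    let es_unico := (PySem.List.pyRange 0 i 1).foldl (fun b j =>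
      if b && (PySem.List.pyGetD identificadores i 0 == PySem.List.pyGetD identificadores j 0)
      then false else b) true
    if es_unico then contador_unicos + 1 else contador_unicos) 0

-- ===== PORT B =====
def contar_identificadores_unicos_alt (n : Int) (identificadores : List Int) : Int :=
  ((PySem.List.pyRange 0 n 1).foldl (fun (vistos : PySem.Set Int) i =>
    PySem.Set.add vistos (PySem.List.pyGetD identificadores i 0)) PySem.Set.empty).length

-- ===== PRECONDITION & SPEC =====
-- Pre_ excludes n > len(identificadores): there both Pythons raise IndexError, except the
-- single accidental corner n = 1 on an empty list, where A returns 1 without ever indexing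
-- (its inner loop body is empty) while B, which reads every counted element, raises.
def Pre_contar_identificadores_unicos (n : Int) (identificadores : List Int) : Prop :=
  n ≤ (identificadores.length : Int)
instance (n : Int) (identificadores : List Int) : Decidable (Pre_contar_identificadores_unicos n identificadores) := by unfold Pre_contar_identificadores_unicos; infer_instance

def pvWitness_contar_identificadores_unicos : Int × List Int := (3, [7, 7, 2])

def Spec_contar_identificadores_unicos (n : Int) (identificadores : List Int) (out : Int) : Prop := out = contar_identificadores_unicos_alt n identificadores
instance (n : Int) (identificadores : List Int) (out : Int) : Decidable (Spec_contar_identificadores_unicos n identificadores out) := by unfold Spec_contar_identificadores_unicos; infer_instance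

-- ===== CLAIM (what is proved, stated in full; the proofs are below) =====
def Claim_equal_contar_identificadores_unicos : Prop := ∀ (n : Int) (identificadores : List Int), Dom_contar_identificadores_unicos n identificadores → Pre_contar_identificadores_unicos n identificadores → Spec_contar_identificadores_unicos n identificadores (contar_identificadores_unicos n identificadores)

-- ===== LEMMAS AND PROOFS =====

-- A's inner loop (the break only skips work) computes a pure and-flag over the range
theorem pv_flag_fold (l : List Int) (p : Int → Bool) (b : Bool) :
    l.foldl (fun b j => if b && p j then false else b) b = (b && l.all fun j => !p j) := by
  induction l generalizing b with
  | nil => simp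
  | cons x xs ih =>
    rw [List.foldl_cons, ih]
    cases b <;> by_cases h : p x <;> simp [h]

theorem pv_take_succ_eq (ids : List Int) (k : Nat) (hlt : k < ids.length) :
    List.take (k+1) ids = List.take k ids ++ [ids[k]] := by
  rw [List.take_add_one]; simp [List.getElem?_eq_getElem hlt]

theorem pv_getD_eq (ids : List Int) (k : Nat) (hlt : k < ids.length) :
    PySem.List.pyGetD ids (k : Int) 0 = ids[k] := by
  simp [PySem.List.pyGetD_natCast, List.getD_eq_getElem?_getD, List.getElem?_eq_getElem hlt]

-- reading identificadores at each index of range(k) yields the length-k prefix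
theorem pv_prefix_map (ids : List Int) (k : Nat) (hk : k ≤ ids.length) :
    (PySem.List.pyRange 0 (k:Int) 1).map (fun j => PySem.List.pyGetD ids j 0) = ids.take k := by
  induction k with
  | zero => simp [PySem.List.pyRange_one_eq_nil]
  | succ k ih =>
    have hlt : k < ids.length := hk
    have hcast : ((k+1 : Nat) : Int) = (k : Int) + 1 := by push_cast; ring
    rw [hcast, PySem.List.pyRange_one_succ_right (by positivity), List.map_append,
        ih (Nat.le_of_succ_le hk), pv_take_succ_eq ids k hlt]
    simp [pv_getD_eq ids k hlt]

-- B's running set after k iterations is the set of the length-k prefix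
theorem pv_set_fold_take (ids : List Int) (k : Nat) (hk : k ≤ ids.length) :
    (PySem.List.pyRange 0 (k:Int) 1).foldl
      (fun (s : PySem.Set Int) i => PySem.Set.add s (PySem.List.pyGetD ids i 0)) PySem.Set.empty
      = PySem.Set.ofList (ids.take k) := by
  induction k with
  | zero => simp [PySem.List.pyRange_one_eq_nil, PySem.Set.ofList_eq_foldl, PySem.Set.empty]
  | succ k ih =>
    have hlt : k < ids.length := hk
    have hcast : ((k+1 : Nat) : Int) = (k : Int) + 1 := by push_cast; ring
    rw [hcast, PySem.List.pyRange_one_succ_right (by positivity), List.foldl_append,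
        ih (Nat.le_of_succ_le hk), pv_take_succ_eq ids k hlt,
        PySem.Set.ofList_eq_foldl, PySem.Set.ofList_eq_foldl, List.foldl_append]
    simp only [List.foldl_cons, List.foldl_nil, pv_getD_eq ids k hlt]

-- A's count after k iterations equals the number of distinct elements of the prefix
theorem pv_count_eq (ids : List Int) (k : Nat) (hk : k ≤ ids.length) :
    (PySem.List.pyRange 0 (k:Int) 1).foldl (fun contador_unicos i =>
      let es_unico := (PySem.List.pyRange 0 i 1).foldl (fun b j =>
        if b && (PySem.List.pyGetD ids i 0 == PySem.List.pyGetD ids j 0)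
        then false else b) true
      if es_unico then contador_unicos + 1 else contador_unicos) (0:Int)
      = ((PySem.Set.ofList (ids.take k)).length : Int) := by
  induction k with
  | zero => simp [PySem.List.pyRange_one_eq_nil, PySem.Set.ofList_eq_foldl]
  | succ k ih =>
    have hlt : k < ids.length := hk
    have hcast : ((k+1 : Nat) : Int) = (k : Int) + 1 := by push_cast; ring
    rw [hcast, PySem.List.pyRange_one_succ_right (by positivity), List.foldl_append,
        ih (Nat.le_of_succ_le hk)]
    simp only [List.foldl_cons, List.foldl_nil, pv_flag_fold, Bool.true_and,
      pv_getD_eq ids k hlt]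
    have hmapall : (PySem.List.pyRange 0 (k:Int) 1).all (fun j => !(ids[k] == PySem.List.pyGetD ids j 0))
        = (ids.take k).all (fun y => !(ids[k] == y)) := by
      rw [← pv_prefix_map ids k (le_of_lt hlt), List.all_map]; rfl
    have hofl : PySem.Set.ofList (ids.take (k+1)) = PySem.Set.add (PySem.Set.ofList (ids.take k)) ids[k] := by
      rw [pv_take_succ_eq ids k hlt, PySem.Set.ofList_eq_foldl, PySem.Set.ofList_eq_foldl,
          List.foldl_append]
      rfl
    rw [hmapall, hofl]
    by_cases hx : ids[k] ∈ ids.take k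
    · have h1 : (ids.take k).all (fun y => !(ids[k] == y)) = false := by
        rw [List.all_eq_false]; exact ⟨ids[k], hx, by simp⟩
      have h2 : (PySem.Set.add (PySem.Set.ofList (ids.take k)) ids[k]).length
          = (PySem.Set.ofList (ids.take k)).length := by
        simp [PySem.Set.add, PySem.Set.contains, (PySem.Set.mem_ofList _ _).mpr hx]
      rw [h1, h2]; simp
    · have h1 : (ids.take k).all (fun y => !(ids[k] == y)) = true := by
        rw [List.all_eq_true]; intro y hy; simp only [Bool.not_eq_true', beq_eq_false_iff_ne]
        intro h; exact hx (h ▸ hy)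
      have hnm : ¬ ids[k] ∈ PySem.Set.ofList (ids.take k) :=
        fun h => hx ((PySem.Set.mem_ofList _ _).mp h)
      have h2 : (PySem.Set.add (PySem.Set.ofList (ids.take k)) ids[k]).length
          = (PySem.Set.ofList (ids.take k)).length + 1 := by
        simp [PySem.Set.add, PySem.Set.contains, hnm]
      rw [h1, h2]; push_cast; simp

-- ===== VERDICT (by name: the statement is the Claim_ definition above) =====
theorem contar_identificadores_unicos_spec : Claim_equal_contar_identificadores_unicos := by
  intro n ids _ hpre
  unfold Spec_contar_identificadores_unicos
  by_cases hn : n ≤ 0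
  · simp [contar_identificadores_unicos, contar_identificadores_unicos_alt,
      PySem.List.pyRange_one_eq_nil hn, PySem.Set.empty]
  · rw [not_le] at hn
    have hkn : ((n.toNat : Nat) : Int) = n := Int.toNat_of_nonneg (le_of_lt hn)
    have hk : n.toNat ≤ ids.length := by
      unfold Pre_contar_identificadores_unicos at hpre; omega
    have hA : contar_identificadores_unicos ((n.toNat : Nat) : Int) ids
        = ((PySem.Set.ofList (ids.take n.toNat)).length : Int) := by
      unfold contar_identificadores_unicos; exact pv_count_eq ids n.toNat hk
    have hB : contar_identificadores_unicos_alt ((n.toNat : Nat) : Int) ids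
        = ((PySem.Set.ofList (ids.take n.toNat)).length : Int) := by
      unfold contar_identificadores_unicos_alt
      rw [pv_set_fold_take ids n.toNat hk]
    rw [← hkn, hA, hB]
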